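-- pv_equiv track=rewrite | github.com/jancaaa/advent-of-code2020 | day24/day24.py | build_floor
-- ===== SOURCE A (Python) =====
-- import collections
--
-- def move(x: int, y: int, direction: str) -> (int, int):  # get coordinates (x, y) of tile in given direction
--     if direction == "e":
--         return x + 1, y
--     elif direction == "w":
--         return x - 1, y
--
--     if direction.endswith("w"):
--         if y % 2 == 0:
--             x = x - 1
--         else:
--             x = x
--     elif direction.endswith("e"):
--         if y % 2 == 0:
--             x = x
--         else:
--             x = x + 1
--
--     if direction.startswith("n"):
--         y = y + 1
--     elif direction.startswith("s"):
--         y = y - 1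
--
--     return x, y
--
-- def build_floor(input: list) -> dict:
--     floor = collections.defaultdict(dict)
--
--     for line in input:
--         x, y = 0, 0  # starting point
--         for i in line:
--             x, y = move(x, y, i)
--
--         if x in floor[y].keys():
--             if floor[y][x] == "W":
--                 floor[y][x] = "B"
--             else:
--                 floor[y][x] = "W"
--
--         else:
--             # is white by default
--             floor[y][x] = "B"
--     return floor
-- ===== SOURCE B (Python) =====
-- import collections
--
-- def _step(x, y, d):
--     # arithmetic form of one hex move: x-offset is (p-1) or p where p = y % 2
--     if d == "e":
--         return x + 1, y
--     if d == "w":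
--         return x - 1, y
--     p = y % 2
--     if d.endswith("w"):
--         x += p - 1
--     elif d.endswith("e"):
--         x += p
--     if d.startswith("n"):
--         y += 1
--     elif d.startswith("s"):
--         y -= 1
--     return x, y
--
-- def _walk(line):
--     x, y = 0, 0
--     for d in line:
--         x, y = _step(x, y, d)
--     return x, y
--
-- def build_floor(input: list) -> dict:
--     # pass 1: count how many paths end on each tile
--     counts = {}
--     for line in input:
--         p = _walk(line)
--         counts[p] = counts.get(p, 0) + 1
--     # pass 2: colour is the flip parity - odd flips = black, even = white
--     floor = collections.defaultdict(dict)
--     for (x, y), c in counts.items():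
--         floor[y][x] = "B" if c % 2 == 1 else "W"
--     return floor
-- ===== Notes on version B (the rewrite author's own statement) =====
-- stated objective: alternative
-- what changed: B replaces A's running white/black toggle on a nested dict with a two-pass decomposition (count path endpoints in a plain dict, then paint each tile from flip parity: odd = B, even = W), and replaces move's branch-per-parity helper with an arithmetic step (x += p-1 or p where p = y % 2) driven by a recursive walker.
import Mathlib
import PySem

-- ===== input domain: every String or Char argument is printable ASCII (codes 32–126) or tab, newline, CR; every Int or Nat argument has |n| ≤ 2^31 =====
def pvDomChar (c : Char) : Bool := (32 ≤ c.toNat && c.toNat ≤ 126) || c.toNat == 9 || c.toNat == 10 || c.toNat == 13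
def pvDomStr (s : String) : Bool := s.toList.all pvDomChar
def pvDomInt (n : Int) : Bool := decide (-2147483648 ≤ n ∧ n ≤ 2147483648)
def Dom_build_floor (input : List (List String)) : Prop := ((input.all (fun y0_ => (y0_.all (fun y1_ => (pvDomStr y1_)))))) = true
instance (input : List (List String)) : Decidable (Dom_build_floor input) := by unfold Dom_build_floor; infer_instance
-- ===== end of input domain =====

-- B replaces A's running W/B toggle with two passes (count endpoints in a plain dict, then paint by flip parity), with an arithmetic per-character step; same cost, different decomposition.

-- ===== PORT A =====
-- module helper `move` of Source A
def move (x : Int) (y : Int) (direction : String) : Int × Int :=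
  if direction = "e" then (x + 1, y)
  else if direction = "w" then (x - 1, y)
  else
    let x :=
      if PySem.Str.endswith direction "w" then
        (if PySem.Int.mod y 2 = 0 then x - 1 else x)
      else if PySem.Str.endswith direction "e" then
        (if PySem.Int.mod y 2 = 0 then x else x + 1)
      else x
    let y :=
      if PySem.Str.startswith direction "n" then y + 1
      else if PySem.Str.startswith direction "s" then y - 1
      else y
    (x, y)

def build_floor (input : List (List String)) : List (Int × List (Int × String)) :=
  let floor : PySem.Dict Int (PySem.Dict Int String) :=
    input.foldl (fun floor line =>
      let p := line.foldl (fun p i => move p.1 p.2 i) ((0 : Int), (0 : Int))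
      let inner := floor.getD p.2 PySem.Dict.empty   -- defaultdict access floor[y]
      let inner' :=
        if inner.contains p.1 then
          (if inner.getD p.1 "" = "W" then inner.insert p.1 "B" else inner.insert p.1 "W")
        else inner.insert p.1 "B"
      floor.insert p.2 inner') PySem.Dict.empty
  floor.items.map (fun q => (q.1, q.2.items))

-- ===== PORT B =====
-- Source B's _step: arithmetic form of one move (x-offset is p-1 or p where p = y % 2)
def bstep (x : Int) (y : Int) (d : String) : Int × Int :=
  if d = "e" then (x + 1, y)
  else if d = "w" then (x - 1, y)
  else
    let p := PySem.Int.mod y 2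
    let x :=
      if PySem.Str.endswith d "w" then x + (p - 1)
      else if PySem.Str.endswith d "e" then x + p
      else x
    let y :=
      if PySem.Str.startswith d "n" then y + 1
      else if PySem.Str.startswith d "s" then y - 1
      else y
    (x, y)

-- Source B's _walk: character-by-character recursion from the start tile
def bwalk (x : Int) (y : Int) : List String → Int × Int
  | [] => (x, y)
  | d :: rest =>
      let q := bstep x y d
      bwalk q.1 q.2 rest

-- Source B pass 1: counts[p] = counts.get(p, 0) + 1 per line
def bcount : List (List String) → PySem.Dict (Int × Int) Int → PySem.Dict (Int × Int) Int
  | [], counts => counts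
  | line :: rest, counts =>
      let p := bwalk 0 0 line
      bcount rest (counts.insert p (counts.getD p 0 + 1))

-- Source B pass 2: paint each counted tile by flip parity
def bpaint : List ((Int × Int) × Int) → PySem.Dict Int (PySem.Dict Int String) →
    PySem.Dict Int (PySem.Dict Int String)
  | [], fl => fl
  | pc :: rest, fl =>
      bpaint rest (fl.insert pc.1.2 ((fl.getD pc.1.2 PySem.Dict.empty).insert pc.1.1
        (if PySem.Int.mod pc.2 2 = 1 then "B" else "W")))

def build_floor_alt (input : List (List String)) : List (Int × List (Int × String)) :=
  (bpaint (bcount input PySem.Dict.empty).items PySem.Dict.empty).items.map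
    (fun q => (q.1, q.2.items))

-- ===== PRECONDITION & SPEC =====
def Spec_build_floor (input : List (List String)) (out : List (Int × List (Int × String))) : Prop := out = build_floor_alt input
instance (input : List (List String)) (out : List (Int × List (Int × String))) : Decidable (Spec_build_floor input out) := by unfold Spec_build_floor; infer_instance

-- ===== CLAIM (what is proved, stated in full; the proofs are below) =====
def Claim_equal_build_floor : Prop := ∀ (input : List (List String)), Dom_build_floor input → Spec_build_floor input (build_floor input)

-- ===== LEMMAS AND PROOFS =====

-- endpoint of one line's walk (A's inner loop)
def pvEndpoint (line : List String) : Int × Int :=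
  line.foldl (fun p i => move p.1 p.2 i) ((0 : Int), (0 : Int))

-- colour from flip parity
def pvVal (ps : List (Int × Int)) (p : Int × Int) : String :=
  if PySem.Int.mod ((ps.count p : Nat) : Int) 2 = 1 then "B" else "W"

-- canonical nested-floor builder over a key sequence
def pvNest (S : List (Int × Int)) (v : (Int × Int) → String) : PySem.Dict Int (PySem.Dict Int String) :=
  S.foldl (fun fl p => fl.insert p.2 ((fl.getD p.2 PySem.Dict.empty).insert p.1 (v p))) PySem.Dict.empty

-- A's fold body and B's paint body, named for the proofs
def pvStepA (fl : PySem.Dict Int (PySem.Dict Int String)) (p : Int × Int) :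
    PySem.Dict Int (PySem.Dict Int String) :=
  fl.insert p.2
    (if (fl.getD p.2 PySem.Dict.empty).contains p.1 then
      (if (fl.getD p.2 PySem.Dict.empty).getD p.1 "" = "W" then
        (fl.getD p.2 PySem.Dict.empty).insert p.1 "B"
      else (fl.getD p.2 PySem.Dict.empty).insert p.1 "W")
    else (fl.getD p.2 PySem.Dict.empty).insert p.1 "B")

def pvStepB (fl : PySem.Dict Int (PySem.Dict Int String)) (pc : (Int × Int) × Int) :
    PySem.Dict Int (PySem.Dict Int String) :=
  fl.insert pc.1.2
    ((fl.getD pc.1.2 PySem.Dict.empty).insert pc.1.1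
      (if PySem.Int.mod pc.2 2 = 1 then "B" else "W"))

-- B's arithmetic step computes exactly A's move
theorem bstep_eq_move (x y : Int) (d : String) : bstep x y d = move x y d := by
  unfold bstep move
  have h0 : 0 ≤ PySem.Int.mod y 2 := PySem.Int.mod_nonneg y (by norm_num)
  have h1 : PySem.Int.mod y 2 < 2 := PySem.Int.mod_lt y (by norm_num)
  split_ifs <;> simp_all <;> omega

theorem bwalk_eq_endpoint (line : List String) :
    ∀ x y : Int, bwalk x y line = line.foldl (fun p i => move p.1 p.2 i) (x, y) := by
  induction line with
  | nil => intro x y; rfl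
  | cons d rest ih =>
    intro x y
    simp only [bwalk, List.foldl_cons, bstep_eq_move]
    exact ih (move x y d).1 (move x y d).2

theorem bcount_eq_foldl (l : List (List String)) :
    ∀ c, bcount l c
      = l.foldl (fun c line =>
          c.insert (pvEndpoint line) (c.getD (pvEndpoint line) 0 + 1)) c := by
  induction l with
  | nil => intro c; rfl
  | cons line rest ih =>
    intro c
    simp only [bcount, List.foldl_cons, bwalk_eq_endpoint, pvEndpoint]
    exact ih _

theorem bpaint_eq_foldl (l : List ((Int × Int) × Int)) :
    ∀ fl, bpaint l fl = l.foldl pvStepB fl := by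
  induction l with
  | nil => intro fl; rfl
  | cons pc rest ih =>
    intro fl
    simp only [bpaint, List.foldl_cons, pvStepB]
    exact ih _

theorem pvNest_append (S : List (Int × Int)) (v : (Int × Int) → String) (p : Int × Int) :
    pvNest (S ++ [p]) v
      = (pvNest S v).insert p.2 (((pvNest S v).getD p.2 PySem.Dict.empty).insert p.1 (v p)) := by
  simp [pvNest, List.foldl_append]

theorem pvNest_congr (S : List (Int × Int)) (v w : (Int × Int) → String)
    (h : ∀ p ∈ S, v p = w p) : pvNest S v = pvNest S w := by
  unfold pvNest
  exact PySem.List.foldl_congr_mem S _ _ _ (fun acc x hx => by rw [h x hx])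

theorem pvNest_contains (S : List (Int × Int)) (v : (Int × Int) → String) (x y : Int) :
    (((pvNest S v).getD y PySem.Dict.empty).contains x = true) ↔ (x, y) ∈ S := by
  induction S using List.reverseRecOn with
  | nil => simp [pvNest, PySem.Dict.getD_empty, PySem.Dict.contains_empty]
  | append_singleton S r ih =>
    rw [pvNest_append]
    rcases r with ⟨a, b⟩
    rw [PySem.Dict.getD_insert]
    by_cases hy : y = b
    · subst hy
      rw [if_pos rfl, PySem.Dict.contains_insert]
      simp only [Bool.or_eq_true, beq_iff_eq, ih, List.mem_append, List.mem_singleton,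
        Prod.mk.injEq]
      tauto
    · rw [if_neg hy, ih]
      simp only [List.mem_append, List.mem_singleton, Prod.mk.injEq]
      tauto

theorem pvNest_contains_outer (S : List (Int × Int)) (v : (Int × Int) → String) (x y : Int)
    (h : (x, y) ∈ S) : (pvNest S v).contains y = true := by
  by_cases hc : (pvNest S v).contains y = true
  · exact hc
  · exfalso
    have hfalse : (pvNest S v).contains y = false := by
      cases hcc : (pvNest S v).contains y
      · rfl
      · exact absurd hcc hc
    have := (pvNest_contains S v x y).mpr h
    rw [PySem.Dict.getD_of_not_contains _ _ hfalse] at this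
    simp [PySem.Dict.contains_empty] at this

theorem pvNest_getD (S : List (Int × Int)) (v : (Int × Int) → String) (x y : Int)
    (h : (x, y) ∈ S) :
    ((pvNest S v).getD y PySem.Dict.empty).getD x "" = v (x, y) := by
  induction S using List.reverseRecOn with
  | nil => simp at h
  | append_singleton S r ih =>
    rw [pvNest_append]
    rcases r with ⟨a, b⟩
    rw [PySem.Dict.getD_insert]
    by_cases hy : y = b
    · subst hy
      rw [if_pos rfl, PySem.Dict.getD_insert]
      by_cases hx : x = a
      · subst hx; rw [if_pos rfl]
      · rw [if_neg hx]
        have hmem : (x, y) ∈ S := by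
          rcases List.mem_append.mp h with h' | h'
          · exact h'
          · simp only [List.mem_singleton, Prod.mk.injEq] at h'
            exact absurd h'.1 hx
        exact ih hmem
    · rw [if_neg hy]
      have hmem : (x, y) ∈ S := by
        rcases List.mem_append.mp h with h' | h'
        · exact h'
        · simp only [List.mem_singleton, Prod.mk.injEq] at h'
          exact absurd h'.2 hy
      exact ih hmem

-- two inserts at distinct keys commute when the first key is already present
theorem pv_insert_insert_comm {κ ν : Type} [BEq κ] [LawfulBEq κ]
    (d : PySem.Dict κ ν) (k k' : κ) (v v' : ν)
    (hk : d.contains k = true) (hne : k ≠ k') :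
    (d.insert k' v').insert k v = (d.insert k v).insert k' v' := by
  apply PySem.Dict.ext
  have hk1 : (d.insert k' v').contains k = true := by
    rw [PySem.Dict.contains_insert]; simp [hk]
  have hk2 : (d.insert k v).contains k' = (d.contains k') := by
    rw [PySem.Dict.contains_insert]
    have : (k' == k) = false := by simp [Ne.symm hne]
    simp [this]
  rw [PySem.Dict.items_insert_of_contains (d := d.insert k' v') v hk1]
  by_cases hc : d.contains k' = true
  · rw [PySem.Dict.items_insert_of_contains (d := d.insert k v) v' (by rw [hk2]; exact hc),
        PySem.Dict.items_insert_of_contains (d := d) v' hc,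
        PySem.Dict.items_insert_of_contains (d := d) v hk]
    simp only [List.map_map]
    apply List.map_congr_left
    intro p _
    simp only [Function.comp]
    by_cases h1 : p.1 = k'
    · simp [h1, Ne.symm hne]
    · by_cases h2 : p.1 = k <;> simp [h1, h2, hne]
  · have hcf : d.contains k' = false := by
      cases hcc : d.contains k'
      · rfl
      · exact absurd hcc hc
    rw [PySem.Dict.items_insert_of_not_contains (d := d.insert k v) v' (by rw [hk2]; exact hcf),
        PySem.Dict.items_insert_of_not_contains (d := d) v' hcf,
        PySem.Dict.items_insert_of_contains (d := d) v hk]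
    rw [List.map_append]
    congr 1
    simp [Ne.symm hne]

-- toggling an existing tile's value equals rebuilding with the updated value function
theorem pvNest_update (S : List (Int × Int)) (hS : S.Nodup) (v : (Int × Int) → String)
    (x y : Int) (w : String) (h : (x, y) ∈ S) :
    (pvNest S v).insert y (((pvNest S v).getD y PySem.Dict.empty).insert x w)
      = pvNest S (fun q => if q = (x, y) then w else v q) := by
  induction S using List.reverseRecOn with
  | nil => simp at h
  | append_singleton S r ih =>
    have hS' : S.Nodup := (List.nodup_append.mp hS).1
    have hrS : r ∉ S := by
      intro hmem
      have h2 := (List.nodup_append.mp hS).2.2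
      exact (h2 r hmem r (List.mem_singleton_self r)) rfl
    rcases r with ⟨a, b⟩
    rw [pvNest_append, pvNest_append]
    by_cases hr : ((x, y) : Int × Int) = (a, b)
    · -- the updated tile is the last key; (x,y) ∉ S
      have hxa : x = a := (Prod.mk.injEq .. ▸ hr).1
      have hyb : y = b := (Prod.mk.injEq .. ▸ hr).2
      subst hxa; subst hyb
      have hxyS : (x, y) ∉ S := hr ▸ hrS
      have hcongr : pvNest S (fun q => if q = (x, y) then w else v q) = pvNest S v := by
        apply pvNest_congr
        intro p hp
        have hne : p ≠ (x, y) := fun he => hxyS (he ▸ hp)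
        exact if_neg hne
      rw [hcongr]
      rw [PySem.Dict.getD_insert, if_pos rfl, PySem.Dict.insert_insert_self,
          PySem.Dict.insert_insert_self]
      simp
    · -- the updated tile lies in S
      have hmem : (x, y) ∈ S := by
        rcases List.mem_append.mp h with h' | h'
        · exact h'
        · simp only [List.mem_singleton] at h'
          exact absurd h' hr
      have hrne : ¬ (((a, b) : Int × Int) = (x, y)) := fun he => hr he.symm
      rw [← ih hS' hmem, if_neg hrne]
      set D := pvNest S v with hD
      by_cases hy : y = b
      · subst hy
        have hxa : x ≠ a := fun he => hr (by simp [he])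
        rw [PySem.Dict.getD_insert, if_pos rfl, PySem.Dict.insert_insert_self]
        have hinner : (D.getD y PySem.Dict.empty).contains x = true :=
          (pvNest_contains S v x y).mpr hmem
        rw [pv_insert_insert_comm (D.getD y PySem.Dict.empty) x a w (v (a, y)) hinner hxa]
        rw [PySem.Dict.getD_insert, if_pos rfl, PySem.Dict.insert_insert_self]
      · rw [PySem.Dict.getD_insert, if_neg hy]
        have houter : D.contains y = true := pvNest_contains_outer S v x y hmem
        rw [pv_insert_insert_comm D y b (((D.getD y PySem.Dict.empty).insert x w))
              ((D.getD b PySem.Dict.empty).insert a (v (a, b))) houter hy]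
        rw [PySem.Dict.getD_insert, if_neg (fun hbe => hy hbe.symm)]

-- the flip parity of a count bumped by one
theorem pvVal_snoc_self (ps : List (Int × Int)) (p : Int × Int) :
    pvVal (ps ++ [p]) p = (if pvVal ps p = "W" then "B" else "W") := by
  unfold pvVal
  have hc : (ps ++ [p]).count p = ps.count p + 1 := by simp
  rw [hc]
  have hcast : ∀ n : Nat, PySem.Int.mod ((n : Nat) : Int) 2 = ((n % 2 : Nat) : Int) :=
    fun n => by exact_mod_cast PySem.Int.mod_natCast n 2
  rw [hcast, hcast]
  rcases Nat.mod_two_eq_zero_or_one (ps.count p) with h | h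
  · have h1 : (ps.count p + 1) % 2 = 1 := by omega
    rw [h, h1]; decide
  · have h1 : (ps.count p + 1) % 2 = 0 := by omega
    rw [h, h1]; decide

theorem pvVal_snoc_ne (ps : List (Int × Int)) (p q : Int × Int) (h : q ≠ p) :
    pvVal (ps ++ [p]) q = pvVal ps q := by
  unfold pvVal
  have hc : (ps ++ [p]).count q = ps.count q := by
    rw [List.count_append]
    simp [Ne.symm h]
  rw [hc]

-- A's toggle fold equals the canonical parity build
theorem pv_foldA (ps : List (Int × Int)) :
    ps.foldl pvStepA PySem.Dict.empty = pvNest (PySem.Set.ofList ps) (pvVal ps) := by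
  induction ps using List.reverseRecOn with
  | nil => simp [pvNest, PySem.Set.ofList]
  | append_singleton ps p ih =>
    rw [List.foldl_append, List.foldl_cons, List.foldl_nil, ih]
    rw [PySem.Set.ofList_append_singleton]
    set S := PySem.Set.ofList ps with hS
    simp only [pvStepA]
    by_cases hp : p ∈ ps
    · have hpS : p ∈ S := (PySem.Set.mem_ofList _ _).mpr hp
      rw [PySem.Set.add_of_mem hpS]
      have hcont : ((pvNest S (pvVal ps)).getD p.2 PySem.Dict.empty).contains p.1 = true :=
        (pvNest_contains S (pvVal ps) p.1 p.2).mpr hpS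
      have hval : ((pvNest S (pvVal ps)).getD p.2 PySem.Dict.empty).getD p.1 "" = pvVal ps p :=
        pvNest_getD S (pvVal ps) p.1 p.2 hpS
      rw [if_pos hcont, hval]
      rw [← apply_ite (((pvNest S (pvVal ps)).getD p.2 PySem.Dict.empty).insert p.1)]
      rw [pvNest_update S (PySem.Set.nodup_ofList ps) (pvVal ps) p.1 p.2 _ hpS]
      apply pvNest_congr
      intro q hq
      dsimp only
      by_cases hqp : q = p
      · subst hqp
        rw [if_pos rfl, (pvVal_snoc_self ps q).symm]
      · rw [if_neg hqp, pvVal_snoc_ne ps p q hqp]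
    · have hpS : p ∉ S := fun hmem => hp ((PySem.Set.mem_ofList _ _).mp hmem)
      rw [PySem.Set.add_of_not_mem hpS, pvNest_append]
      have hcongr : pvNest S (pvVal (ps ++ [p])) = pvNest S (pvVal ps) :=
        pvNest_congr _ _ _ (fun q hq => pvVal_snoc_ne ps p q (fun he => hpS (he ▸ hq)))
      rw [hcongr]
      have hcont : ((pvNest S (pvVal ps)).getD p.2 PySem.Dict.empty).contains p.1 = false := by
        cases hcc : ((pvNest S (pvVal ps)).getD p.2 PySem.Dict.empty).contains p.1
        · rfl
        · exact absurd ((pvNest_contains S (pvVal ps) p.1 p.2).mp hcc) hpS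
      rw [if_neg (by simp [hcont])]
      have hvp : pvVal (ps ++ [p]) p = "B" := by
        unfold pvVal
        have h1 : (ps ++ [p]).count p = 1 := by
          rw [List.count_append]
          simp [List.count_eq_zero.mpr hp]
        rw [h1]
        decide
      rw [hvp]

-- ===== VERDICT (by name: the statement is the Claim_ definition above) =====
theorem build_floor_spec : Claim_equal_build_floor := by
  intro input _
  show build_floor input = build_floor_alt input
  have hA : build_floor input
      = (((input.map pvEndpoint).foldl pvStepA PySem.Dict.empty).items.map
          (fun q => (q.1, q.2.items))) := by
    show (((input.foldl (fun fl line => pvStepA fl (pvEndpoint line))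
        PySem.Dict.empty)).items.map (fun q => (q.1, q.2.items))) = _
    rw [← List.foldl_map (f := pvEndpoint) (g := pvStepA)]
  have hB : build_floor_alt input
      = (((PySem.Dict.counter (input.map pvEndpoint)).items.foldl pvStepB
          PySem.Dict.empty).items.map (fun q => (q.1, q.2.items))) := by
    unfold build_floor_alt
    rw [bpaint_eq_foldl, bcount_eq_foldl,
        ← List.foldl_map (f := pvEndpoint)
          (g := fun c p => PySem.Dict.insert c p (c.getD p 0 + 1)),
        PySem.Dict.foldl_insert_getD_add_one_eq_counter]
  rw [hA, hB, PySem.Dict.items_counter, pv_foldA, List.foldl_map]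
  rfl
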